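-- pv_equiv track=rewrite | github.com/yasufumi-nakata/Pytra | src/hooks/scala/emitter/scala_native_emitter.py | _extract_pytra_refs
-- ===== SOURCE A (Python) =====
-- def _extract_pytra_refs(text: str) -> set[str]:
--     out: set[str] = set()
--     marker = "__pytra_"
--     i = 0
--     while True:
--         pos = text.find(marker, i)
--         if pos < 0:
--             break
--         j = pos + len(marker)
--         while j < len(text):
--             ch = text[j]
--             if ch.isalnum() or ch == "_":
--                 j += 1
--                 continue
--             break
--         out.add(text[pos:j])
--         i = j
--     return out
-- ===== SOURCE B (Python) =====
-- def _extract_pytra_refs(text: str) -> set[str]: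
--     # Two-phase: split text into maximal word-character runs, then take one
--     # token per run that contains the marker (from its first occurrence to
--     # the run's end) -- no index bookkeeping or nested scanning loop.
--     marker = "__pytra_"
--     runs = []
--     cur = ""
--     for ch in text:
--         if ch.isalnum() or ch == "_":
--             cur += ch
--         else:
--             if cur:
--                 runs.append(cur)
--             cur = ""
--     if cur:
--         runs.append(cur)
--     out: set[str] = set()
--     for run in runs:
--         k = run.find(marker)
--         if k >= 0:
--             out.add(run[k:])
--     return out
-- ===== Notes on version B (the rewrite author's own statement) =====
-- stated objective: alternative
-- what changed: A scans with an index-based str.find jump loop plus an inner index-advancing while; B first splits the text into maximal word-character runs in one pass and then emits one token per marker-containing run (from the marker's first occurrence in the run to the run's end), with no index bookkeeping.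
import Mathlib
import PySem

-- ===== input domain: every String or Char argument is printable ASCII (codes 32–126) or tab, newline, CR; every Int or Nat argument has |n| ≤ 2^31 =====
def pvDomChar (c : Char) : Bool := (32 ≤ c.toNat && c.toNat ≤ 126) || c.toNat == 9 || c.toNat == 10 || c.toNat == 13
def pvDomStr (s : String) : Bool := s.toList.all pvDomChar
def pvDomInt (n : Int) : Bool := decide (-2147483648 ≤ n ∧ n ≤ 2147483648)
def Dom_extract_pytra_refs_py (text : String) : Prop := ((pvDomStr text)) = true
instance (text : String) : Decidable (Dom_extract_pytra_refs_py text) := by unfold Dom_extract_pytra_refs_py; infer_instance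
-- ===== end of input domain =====

-- B replaces A's index-jumping find/extend loop by a two-phase pass (split into maximal
-- word-character runs, then one token per marker-containing run); objective: alternative.

-- shared literal constants of both Pythons: the marker string and the word-character test
def pvMarker : List Char := ['_', '_', 'p', 'y', 't', 'r', 'a', '_']
def pvWord (c : Char) : Bool := PySem.Chars.isalnum c || c == '_'

-- ===== PORT A =====
-- inner `while j < len(text): ... j += 1` of A
def pvAExtend (cs : List Char) (j : Nat) : Nat :=
  if h : j < cs.length then
    if pvWord cs[j] then pvAExtend cs (j + 1) else j
  else j
termination_by cs.length - j

-- bounds of pvAExtend, needed by pvALoop's termination argument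
theorem pvAExtend_ge (cs : List Char) (j : Nat) : j ≤ pvAExtend cs j := by
  fun_induction pvAExtend cs j with
  | case1 j h hw ih => omega
  | case2 j h hw => omega
  | case3 j h => omega

theorem pvAExtend_le (cs : List Char) (j : Nat) (hj : j ≤ cs.length) : pvAExtend cs j ≤ cs.length := by
  fun_induction pvAExtend cs j with
  | case1 j h hw ih => exact ih (by omega)
  | case2 j h hw => omega
  | case3 j h => omega

-- outer `while True` of A; i ≤ len(text) is an invariant of A's loop, carried for termination
def pvALoop (cs : List Char) (i : Nat) (hi : i ≤ cs.length) (out : PySem.Set String) : PySem.Set String :=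
  if hpos : PySem.Chars.findFrom cs pvMarker (i : Int) < 0 then out
  else
    have hspec := PySem.Chars.findFrom_natCast_spec cs pvMarker i hi
      (fun he => hpos (by rw [he]; norm_num))
    have h8 : (PySem.Chars.findFrom cs pvMarker (i : Int)).toNat + pvMarker.length ≤ cs.length := by
      have hl := hspec.2.1.length_le
      simp only [List.length_drop] at hl
      have hm : pvMarker.length = 8 := rfl
      omega
    have hij : i < pvAExtend cs ((PySem.Chars.findFrom cs pvMarker (i : Int)).toNat + pvMarker.length) := by
      have h1 := pvAExtend_ge cs ((PySem.Chars.findFrom cs pvMarker (i : Int)).toNat + pvMarker.length)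
      have h2 : (i : Int) ≤ PySem.Chars.findFrom cs pvMarker (i : Int) := hspec.1
      have : pvMarker.length = 8 := rfl
      omega
    have hle : pvAExtend cs ((PySem.Chars.findFrom cs pvMarker (i : Int)).toNat + pvMarker.length) ≤ cs.length :=
      pvAExtend_le cs _ h8
    pvALoop cs (pvAExtend cs ((PySem.Chars.findFrom cs pvMarker (i : Int)).toNat + pvMarker.length)) hle
      (PySem.Set.add out (String.ofList (PySem.List.slice cs
        (some (PySem.Chars.findFrom cs pvMarker (i : Int)))
        (some ((pvAExtend cs ((PySem.Chars.findFrom cs pvMarker (i : Int)).toNat + pvMarker.length) : Int))))))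
termination_by cs.length - i
decreasing_by omega

def extract_pytra_refs_py (text : String) : List String :=
  pvALoop text.toList 0 (Nat.zero_le _) PySem.Set.empty

-- ===== PORT B =====
def extract_pytra_refs_py_alt (text : String) : List String :=
  let st := text.toList.foldl
    (fun (acc : List (List Char) × List Char) ch =>
      if pvWord ch then (acc.1, acc.2 ++ [ch])
      else if acc.2.isEmpty then (acc.1, ([] : List Char)) else (acc.1 ++ [acc.2], []))
    ([], [])
  let runs := if st.2.isEmpty then st.1 else st.1 ++ [st.2]
  runs.foldl
    (fun (out : PySem.Set String) run =>
      if 0 ≤ PySem.Chars.find run pvMarker then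
        PySem.Set.add out (String.ofList (PySem.List.slice run (some (PySem.Chars.find run pvMarker)) none))
      else out)
    PySem.Set.empty

-- ===== PRECONDITION & SPEC =====
def Spec_extract_pytra_refs_py (text : String) (out : List String) : Prop := out = extract_pytra_refs_py_alt text
instance (text : String) (out : List String) : Decidable (Spec_extract_pytra_refs_py text out) := by unfold Spec_extract_pytra_refs_py; infer_instance

-- ===== CLAIM (what is proved, stated in full; the proofs are below) =====
def Claim_equal_extract_pytra_refs_py : Prop := ∀ (text : String), Dom_extract_pytra_refs_py text → Spec_extract_pytra_refs_py text (extract_pytra_refs_py text)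

-- ===== LEMMAS AND PROOFS =====

set_option maxRecDepth 10000 in
theorem pvMarker_word : ∀ c ∈ pvMarker, pvWord c = true := by
  intro c hc
  simp only [pvMarker, List.mem_cons, List.not_mem_nil, or_false] at hc
  rcases hc with h|h|h|h|h|h|h|h <;> subst h <;> rfl

theorem pvMarker_ne_nil : pvMarker ≠ [] := by decide

-- the canonical token sequence both loops produce, one character-step at a time
def tokC : List Char → List (List Char)
  | [] => []
  | c :: t =>
    if pvMarker.isPrefixOf (c :: t) then
      (pvMarker ++ (List.drop 8 (c :: t)).takeWhile pvWord) ::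
        tokC (List.drop (8 + ((List.drop 8 (c :: t)).takeWhile pvWord).length) (c :: t))
    else tokC t
termination_by l => l.length
decreasing_by
  · simp only [List.length_drop, List.length_cons]; omega
  · simp

def pvAdd (s : PySem.Set String) (tk : List Char) : PySem.Set String :=
  PySem.Set.add s (String.ofList tk)

-- find points at q iff the marker first matches at q
theorem find_eq_of (l : List Char) (q : Nat) (hq : pvMarker <+: l.drop q)
    (hmin : ∀ i < q, ¬ pvMarker <+: l.drop i) : PySem.Chars.find l pvMarker = (q : Int) := by
  have hinf : pvMarker <:+: l := by
    obtain ⟨rest, hrest⟩ := hq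
    exact ⟨l.take q, rest, by rw [List.append_assoc, hrest, List.take_append_drop]⟩
  have h0 : 0 ≤ PySem.Chars.find l pvMarker := (PySem.Chars.find_nonneg_iff l pvMarker).2 hinf
  obtain ⟨hp, hmin'⟩ := PySem.Chars.find_spec h0
  have hpq : (PySem.Chars.find l pvMarker).toNat = q := by
    by_contra hne
    rcases Nat.lt_or_ge (PySem.Chars.find l pvMarker).toNat q with h | h
    · exact hmin _ h hp
    · exact hmin' q (by omega) hq
  omega

-- unfolding helpers for tokC
theorem tokC_neg (c : Char) (t : List Char) (h : ¬ pvMarker <+: (c :: t)) : tokC (c :: t) = tokC t := by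
  rw [tokC, if_neg (by simpa [List.isPrefixOf_iff_prefix] using h)]

theorem tokC_pos (l : List Char) (h : pvMarker <+: l) :
    tokC l = (pvMarker ++ (l.drop 8).takeWhile pvWord) ::
      tokC (l.drop (8 + ((l.drop 8).takeWhile pvWord).length)) := by
  cases l with
  | nil => exact absurd (List.prefix_nil.mp h) pvMarker_ne_nil
  | cons c t => rw [tokC, if_pos (by simpa [List.isPrefixOf_iff_prefix] using h)]

theorem tokC_nil : tokC [] = [] := by rw [tokC]

theorem tokC_nil_of_not_infix (l : List Char) (h : ¬ pvMarker <:+: l) : tokC l = [] := by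
  induction l with
  | nil => exact tokC_nil
  | cons c t ih =>
    rw [tokC_neg c t (fun hp => h (List.infix_cons_iff.mpr (Or.inl hp)))]
    exact ih (fun hi => h (List.infix_cons_iff.mpr (Or.inr hi)))

theorem tokC_skip (l : List Char) (p : Nat) (hmin : ∀ i < p, ¬ pvMarker <+: l.drop i) :
    tokC l = tokC (l.drop p) := by
  induction p generalizing l with
  | zero => simp
  | succ p ih =>
    cases l with
    | nil => simp
    | cons c t =>
      rw [tokC_neg c t (by simpa using hmin 0 (Nat.succ_pos p))]
      have := ih t (fun i hi => by simpa using hmin (i + 1) (by omega))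
      simpa using this

theorem pvAExtend_eq (cs : List Char) (j : Nat) :
    pvAExtend cs j = j + ((cs.drop j).takeWhile pvWord).length := by
  fun_induction pvAExtend cs j with
  | case1 j h hw ih =>
    rw [List.drop_eq_getElem_cons h, List.takeWhile_cons_of_pos hw]
    simp only [List.length_cons] at *
    omega
  | case2 j h hw =>
    rw [List.drop_eq_getElem_cons h, List.takeWhile_cons_of_neg hw]
    simp
  | case3 j h =>
    rw [List.drop_eq_nil_of_le (by omega)]
    simp

theorem pvALoop_eq (n : Nat) : ∀ (cs : List Char) (i : Nat) (hi : i ≤ cs.length) (out : PySem.Set String),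
    cs.length - i = n → pvALoop cs i hi out = (tokC (cs.drop i)).foldl pvAdd out := by
  induction n using Nat.strong_induction_on with
  | _ n ihn =>
    intro cs i hi out hn
    rw [pvALoop]
    have hnat := PySem.Chars.findFrom_natCast cs pvMarker i hi
    by_cases hf : PySem.Chars.find (cs.drop i) pvMarker = -1
    · rw [dif_pos (by rw [hnat, if_pos hf]; norm_num)]
      rw [tokC_nil_of_not_infix _ ((PySem.Chars.find_eq_neg_one_iff _ _).mp hf)]
      rfl
    · have hge : 0 ≤ PySem.Chars.find (cs.drop i) pvMarker := by
        have := PySem.Chars.neg_one_le_find (cs.drop i) pvMarker; omega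
      have hpos : PySem.Chars.findFrom cs pvMarker (i : Int)
          = (i : Int) + PySem.Chars.find (cs.drop i) pvMarker := by rw [hnat, if_neg hf]
      rw [dif_neg (by rw [hpos]; omega)]
      obtain ⟨hp, hmin⟩ := PySem.Chars.find_spec hge
      have hiq : (i : Int) + PySem.Chars.find (cs.drop i) pvMarker
          = ((i + (PySem.Chars.find (cs.drop i) pvMarker).toNat : Nat) : Int) := by omega
      have hml : pvMarker.length = 8 := rfl
      have hdd : (cs.drop i).drop (PySem.Chars.find (cs.drop i) pvMarker).toNat
          = cs.drop (i + (PySem.Chars.find (cs.drop i) pvMarker).toNat) := List.drop_drop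
      -- abbreviations
      set p := (PySem.Chars.find (cs.drop i) pvMarker).toNat with hpdef
      set q := i + p with hqdef
      have hpq : pvMarker <+: cs.drop q := by rw [← hdd]; exact hp
      have h8q : q + 8 ≤ cs.length := by
        have h1 := hpq.length_le
        simp only [List.length_drop, hml] at h1
        have h2 : pvMarker.length = 8 := rfl
        omega
      have htn : ((q : Int)).toNat = q := by omega
      simp only [hpos, hiq, hml, htn, pvAExtend_eq]
      set w := (cs.drop (q + 8)).takeWhile pvWord with hwdef
      -- the token
      have hsplitq : cs.drop q = pvMarker ++ cs.drop (q + 8) := by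
        have hpt8 : pvMarker = (cs.drop q).take 8 := by
          simpa [pvMarker] using List.prefix_iff_eq_take.mp hpq
        conv_lhs => rw [← List.take_append_drop 8 (cs.drop q), ← hpt8, List.drop_drop]
      have htok : PySem.List.slice cs (some ((q : Nat) : Int)) (some ((q + 8 + w.length : Nat) : Int))
          = pvMarker ++ w := by
        rw [PySem.List.slice_natCast cs q (q + 8 + w.length)]
        have harith : q + 8 + w.length - q = 8 + w.length := by omega
        rw [harith, hsplitq, List.take_append]
        have h1 : List.take (8 + w.length) pvMarker = pvMarker := by
          apply List.take_of_length_le; rw [hml]; omega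
        have h2 : (8 + w.length) - pvMarker.length = w.length := by rw [hml]; omega
        rw [h1, h2]
        congr 1
        exact (List.prefix_iff_eq_take.mp (List.takeWhile_prefix pvWord)).symm
      -- the right-hand token list
      have hrhs : tokC (cs.drop i) = (pvMarker ++ w) :: tokC (cs.drop (q + 8 + w.length)) := by
        rw [tokC_skip (cs.drop i) p hmin, hdd, tokC_pos (cs.drop q) hpq]
        rw [List.drop_drop, List.drop_drop]
        have : q + (8 + w.length) = q + 8 + w.length := by omega
        rw [this]
      rw [hrhs]
      simp only [List.foldl_cons]
      have hj : q + 8 + w.length ≤ cs.length := by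
        have := pvAExtend_le cs (q + 8) (by omega)
        rw [pvAExtend_eq cs (q + 8)] at this
        omega
      simp only [← hwdef]
      rw [htok]
      exact ihn (cs.length - (q + 8 + w.length)) (by omega) cs (q + 8 + w.length) hj
        (PySem.Set.add out (String.ofList (pvMarker ++ w))) rfl

-- ===== B side =====
def runsC : List Char → List (List Char)
  | [] => []
  | c :: t => if pvWord c then (c :: t.takeWhile pvWord) :: runsC (t.dropWhile pvWord) else runsC t
termination_by l => l.length
decreasing_by
  · have := List.length_dropWhile_le pvWord t; simp; omega
  · simp

def runsW (cur : List Char) : List Char → List (List Char)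
  | [] => if cur.isEmpty then [] else [cur]
  | c :: t =>
    if pvWord c then runsW (cur ++ [c]) t
    else (if cur.isEmpty then [] else [cur]) ++ runsW [] t

theorem fold_eq_runsW (l : List Char) : ∀ (racc : List (List Char)) (cur : List Char),
    (if (l.foldl
      (fun (acc : List (List Char) × List Char) ch =>
        if pvWord ch then (acc.1, acc.2 ++ [ch])
        else if acc.2.isEmpty then (acc.1, ([] : List Char)) else (acc.1 ++ [acc.2], []))
      (racc, cur)).2.isEmpty
     then (l.foldl
      (fun (acc : List (List Char) × List Char) ch =>
        if pvWord ch then (acc.1, acc.2 ++ [ch])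
        else if acc.2.isEmpty then (acc.1, ([] : List Char)) else (acc.1 ++ [acc.2], []))
      (racc, cur)).1
     else (l.foldl
      (fun (acc : List (List Char) × List Char) ch =>
        if pvWord ch then (acc.1, acc.2 ++ [ch])
        else if acc.2.isEmpty then (acc.1, ([] : List Char)) else (acc.1 ++ [acc.2], []))
      (racc, cur)).1 ++ [(l.foldl
      (fun (acc : List (List Char) × List Char) ch =>
        if pvWord ch then (acc.1, acc.2 ++ [ch])
        else if acc.2.isEmpty then (acc.1, ([] : List Char)) else (acc.1 ++ [acc.2], []))
      (racc, cur)).2]) = racc ++ runsW cur l := by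
  induction l with
  | nil =>
    intro racc cur
    simp only [List.foldl_nil, runsW]
    by_cases h : cur.isEmpty <;> simp [h]
  | cons c t ih =>
    intro racc cur
    simp only [List.foldl_cons, runsW]
    by_cases hw : pvWord c
    · simpa [hw] using ih racc (cur ++ [c])
    · by_cases hc : cur.isEmpty
      · simpa [hw, hc] using ih racc []
      · simpa [hw, hc, List.append_assoc] using ih (racc ++ [cur]) []

theorem runsC_nil : runsC [] = [] := by rw [runsC]

theorem runsC_cons_pos (c : Char) (t : List Char) (hw : pvWord c = true) :
    runsC (c :: t) = (c :: t.takeWhile pvWord) :: runsC (t.dropWhile pvWord) := by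
  rw [runsC, if_pos hw]

theorem runsC_cons_neg (c : Char) (t : List Char) (hw : ¬ pvWord c = true) :
    runsC (c :: t) = runsC t := by
  rw [runsC, if_neg hw]

theorem runsW_spec (n : Nat) : ∀ (l : List Char), l.length = n →
    (∀ (cur : List Char), cur ≠ [] →
      runsW cur l = (cur ++ l.takeWhile pvWord) :: runsC (l.dropWhile pvWord)) ∧
    runsW [] l = runsC l := by
  induction n using Nat.strong_induction_on with
  | _ n ih =>
    intro l hn
    cases l with
    | nil =>
      refine ⟨fun cur hc => ?_, by simp [runsW, runsC_nil]⟩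
      simp [runsW, runsC_nil, List.isEmpty_iff, hc]
    | cons c t =>
      have iht := ih t.length (by simp at hn; omega) t rfl
      constructor
      · intro cur hc
        by_cases hw : pvWord c
        · rw [runsW, if_pos hw, iht.1 (cur ++ [c]) (by simp),
            List.takeWhile_cons_of_pos hw, List.dropWhile_cons_of_pos hw]
          simp
        · rw [runsW, if_neg hw, iht.2, List.takeWhile_cons_of_neg hw,
            List.dropWhile_cons_of_neg hw, runsC_cons_neg c t hw]
          simp [List.isEmpty_iff, hc]
      · by_cases hw : pvWord c
        · rw [runsW, if_pos hw]
          simp only [List.nil_append]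
          rw [iht.1 [c] (by simp), runsC_cons_pos c t hw]
          simp
        · rw [runsW, if_neg hw, runsC_cons_neg c t hw]
          simpa using iht.2

theorem runsW_nil (l : List Char) : runsW [] l = runsC l :=
  (runsW_spec l.length l rfl).2

def optTok (r : List Char) : Option (List Char) :=
  if 0 ≤ PySem.Chars.find r pvMarker then some (r.drop (PySem.Chars.find r pvMarker).toNat) else none

theorem foldl_optTok (rs : List (List Char)) : ∀ (out : PySem.Set String),
    rs.foldl
      (fun (out : PySem.Set String) run =>
        if 0 ≤ PySem.Chars.find run pvMarker then
          PySem.Set.add out (String.ofList (PySem.List.slice run (some (PySem.Chars.find run pvMarker)) none))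
        else out) out
    = (rs.filterMap optTok).foldl pvAdd out := by
  induction rs with
  | nil => intro out; rfl
  | cons r rs ih =>
    intro out
    simp only [List.foldl_cons, List.filterMap_cons, optTok]
    by_cases h : 0 ≤ PySem.Chars.find r pvMarker
    · rw [if_pos h, if_pos h, PySem.List.slice_from r h]
      simp only [List.foldl_cons]
      exact ih _
    · rw [if_neg h, if_neg h]
      exact ih _

theorem find_cons (c : Char) (r' : List Char) (hc : ¬ pvMarker <+: (c :: r')) :
    PySem.Chars.find (c :: r') pvMarker =
      if PySem.Chars.find r' pvMarker = -1 then -1 else PySem.Chars.find r' pvMarker + 1 := by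
  by_cases hi : pvMarker <:+: r'
  · have h0 : 0 ≤ PySem.Chars.find r' pvMarker := (PySem.Chars.find_nonneg_iff r' pvMarker).2 hi
    obtain ⟨hp, hmin⟩ := PySem.Chars.find_spec h0
    rw [if_neg (by omega)]
    have : PySem.Chars.find (c :: r') pvMarker = (((PySem.Chars.find r' pvMarker).toNat + 1 : Nat) : Int) := by
      apply find_eq_of
      · simpa using hp
      · intro i hilt
        cases i with
        | zero => simpa using hc
        | succ i => simpa using hmin i (by omega)
    rw [this]; omega
  · have hni : ¬ pvMarker <:+: (c :: r') := fun h => by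
      rcases List.infix_cons_iff.mp h with h | h
      · exact hc h
      · exact hi h
    rw [(PySem.Chars.find_eq_neg_one_iff r' pvMarker).mpr hi,
      (PySem.Chars.find_eq_neg_one_iff (c :: r') pvMarker).mpr hni]
    simp

theorem word_not_prefix (c : Char) (t : List Char) (hw : ¬ pvWord c = true) :
    ¬ pvMarker <+: (c :: t) := by
  intro h
  obtain ⟨k, hk⟩ := h
  have hc : c = '_' := by
    have := congrArg (fun l => l.head?) hk
    simpa [pvMarker] using this.symm
  rw [hc] at hw
  exact hw (by rfl)

theorem prefix_spill (r rest : List Char)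
    (hrest : ∀ d ds, rest = d :: ds → pvWord d = false)
    (h : pvMarker <+: r ++ rest) : pvMarker <+: r := by
  rcases Nat.lt_or_ge r.length 8 with hlt | hge
  · exfalso
    have hlen : (8 : Nat) ≤ r.length + rest.length := by
      have := h.length_le; simp only [List.length_append] at this
      simpa [pvMarker] using this
    cases hre : rest with
    | nil => rw [hre] at hlen; simp at hlen; omega
    | cons d ds =>
      subst hre
      have hd : pvWord d = false := hrest d ds rfl
      have hml : r.length < pvMarker.length := by simp only [pvMarker]; simpa using hlt
      have hgi := h.getElem hml
      rw [List.getElem_append_right (le_refl r.length)] at hgi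
      have hmem : pvMarker[r.length]'hml ∈ pvMarker := List.getElem_mem hml
      have hww := pvMarker_word _ hmem
      rw [hgi] at hww
      simp at hww
      rw [hww] at hd
      simp at hd
  · have heq : pvMarker = (r ++ rest).take 8 := by
      have := List.prefix_iff_eq_take.mp h
      simpa [pvMarker] using this
    rw [heq, List.take_append_of_le_length hge]
    exact List.take_prefix 8 r

theorem dropWhile_head_false (t : List Char) : ∀ (d : Char) (ds : List Char),
    t.dropWhile pvWord = d :: ds → pvWord d = false := by
  induction t with
  | nil => intro d ds h; simp at h
  | cons c t ih =>
    intro d ds h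
    by_cases hw : pvWord c
    · rw [List.dropWhile_cons_of_pos hw] at h; exact ih d ds h
    · rw [List.dropWhile_cons_of_neg hw] at h
      have : c = d := (List.cons.injEq c t d ds ▸ h).1
      rw [← this]; simpa using hw

theorem lemC (n : Nat) : ∀ (r rest : List Char), r.length = n →
    (∀ x ∈ r, pvWord x = true) → (∀ d ds, rest = d :: ds → pvWord d = false) →
    tokC (r ++ rest) = (match optTok r with
      | some tk => tk :: tokC rest
      | none => tokC rest) := by
  induction n using Nat.strong_induction_on with
  | _ n ih =>
    intro r rest hn hall hrest
    by_cases hpre : pvMarker <+: r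
    · have hfind : PySem.Chars.find r pvMarker = ((0 : Nat) : Int) :=
        find_eq_of r 0 (by simpa using hpre) (fun i hi => absurd hi (Nat.not_lt_zero i))
      have h8 : (8 : Nat) ≤ r.length := by
        have := hpre.length_le; simpa [pvMarker] using this
      rw [tokC_pos (r ++ rest) (hpre.trans (List.prefix_append r rest))]
      have hdrop : (r ++ rest).drop 8 = r.drop 8 ++ rest := List.drop_append_of_le_length h8
      have hallw : ∀ x ∈ r.drop 8, pvWord x = true := fun x hx => hall x (List.mem_of_mem_drop hx)
      have htw : ((r ++ rest).drop 8).takeWhile pvWord = r.drop 8 := by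
        rw [hdrop, List.takeWhile_append_of_pos hallw]
        cases hre : rest with
        | nil => simp
        | cons d ds => rw [List.takeWhile_cons_of_neg (by simp [hrest d ds hre])]; simp
      rw [htw]
      have hmk : pvMarker ++ r.drop 8 = r := by
        have hpt8 : pvMarker = r.take 8 := by
          simpa [pvMarker] using List.prefix_iff_eq_take.mp hpre
        rw [hpt8, List.take_append_drop]
      have hlen : (8 : Nat) + (r.drop 8).length = r.length := by simp; omega
      rw [hmk, hlen, List.drop_left]
      simp [optTok, hfind]
    · cases r with
      | nil =>
        have hfn : PySem.Chars.find ([] : List Char) pvMarker = -1 :=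
          (PySem.Chars.find_eq_neg_one_iff _ _).mpr (by
            intro hi
            exact pvMarker_ne_nil (by simpa using hi))
        simp [optTok, hfn]
      | cons c r' =>
        have hnp : ¬ pvMarker <+: ((c :: r') ++ rest) := fun h => hpre (prefix_spill _ _ hrest h)
        rw [List.cons_append, tokC_neg _ _ (by simpa using hnp)]
        have ihr := ih r'.length (by simp at hn; omega) r' rest rfl
          (fun x hx => hall x (List.mem_cons_of_mem c hx)) hrest
        rw [show r' ++ rest = r' ++ rest from rfl] at ihr
        rw [ihr]
        have hfc := find_cons c r' hpre
        by_cases hf : PySem.Chars.find r' pvMarker = -1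
        · have hcc : PySem.Chars.find (c :: r') pvMarker = -1 := by rw [hfc, if_pos hf]
          simp [optTok, hf, hcc]
        · have hge0 : 0 ≤ PySem.Chars.find r' pvMarker := by
            have := PySem.Chars.neg_one_le_find r' pvMarker; omega
          have hcc : PySem.Chars.find (c :: r') pvMarker = PySem.Chars.find r' pvMarker + 1 := by
            rw [hfc, if_neg hf]
          simp only [optTok, hcc]
          rw [if_pos hge0, if_pos (show (0 : Int) ≤ PySem.Chars.find r' pvMarker + 1 by omega)]
          have htn : (PySem.Chars.find r' pvMarker + 1).toNat = (PySem.Chars.find r' pvMarker).toNat + 1 := by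
            omega
          rw [htn]
          simp

theorem tokB_eq (l : List Char) : (runsC l).filterMap optTok = tokC l := by
  fun_induction runsC l with
  | case1 => simp [tokC_nil]
  | case2 c t hw ih =>
    have hall : ∀ x ∈ c :: t.takeWhile pvWord, pvWord x = true := by
      intro x hx
      rcases List.mem_cons.mp hx with h | h
      · rw [h]; exact hw
      · exact List.mem_takeWhile_imp h
    have hsplit : (c :: t.takeWhile pvWord) ++ t.dropWhile pvWord = c :: t := by
      rw [List.cons_append, List.takeWhile_append_dropWhile]
    have hl := lemC (c :: t.takeWhile pvWord).length (c :: t.takeWhile pvWord)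
      (t.dropWhile pvWord) rfl hall (dropWhile_head_false t)
    rw [hsplit] at hl
    rw [List.filterMap_cons, hl]
    cases optTok (c :: t.takeWhile pvWord) <;> simp [ih]
  | case3 c t hw ih =>
    rw [tokC_neg c t (word_not_prefix c t hw)]
    exact ih

-- ===== VERDICT (by name: the statement is the Claim_ definition above) =====
theorem extract_pytra_refs_py_spec : Claim_equal_extract_pytra_refs_py := by
  intro text _
  unfold Spec_extract_pytra_refs_py
  show pvALoop text.toList 0 (Nat.zero_le _) PySem.Set.empty = _
  rw [pvALoop_eq (text.toList.length - 0) text.toList 0 (Nat.zero_le _) PySem.Set.empty rfl,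
    List.drop_zero]
  simp only [extract_pytra_refs_py_alt]
  rw [foldl_optTok, fold_eq_runsW text.toList [] [], List.nil_append, runsW_nil, tokB_eq]
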